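-- pv_equiv track=rewrite | github.com/SavitaK8/fraud-detection-system | backend/app/utils/whitelists.py | get_domain_category
-- ===== SOURCE A (Python) =====
-- LEGITIMATE_DOMAINS = {
--     # Major Tech Companies
--     'google.com', 'gmail.com', 'youtube.com',
--     'facebook.com', 'fb.com', 'instagram.com', 'whatsapp.com',
--     'microsoft.com', 'outlook.com', 'office.com', 'live.com',
--     'apple.com', 'icloud.com',
--     'amazon.com', 'aws.amazon.com',
--     'twitter.com', 'x.com',
--     'linkedin.com',
--     'netflix.com',
--     'zoom.us',
--     'dropbox.com',
--     'github.com',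
--     'stackoverflow.com',
--     'reddit.com',
--     'wikipedia.org',
--
--     # Financial Services
--     'paypal.com',
--     'stripe.com',
--     'visa.com',
--     'mastercard.com',
--
--     # E-commerce
--     'ebay.com',
--     'shopify.com',
--     'walmart.com',
--     'target.com',
--
--     # Indian Companies
--     'flipkart.com',
--     'paytm.com',
--     'phonepe.com',
--     'bharatpe.com',
--
--     # Government & Education
--     'gov.in',
--     'nic.in',
--     'aktu.ac.in',
--
--     # Other Major Sites
--     'adobe.com',
--     'salesforce.com',
--     'oracle.com',
--     'ibm.com',
--     'cisco.com',
-- }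
--
-- FINANCIAL_DOMAINS = {
--     'paypal.com',
--     'stripe.com',
--     'square.com',
--     'bankofamerica.com',
--     'chase.com',
--     'wellsfargo.com',
--     'citibank.com',
--     'americanexpress.com',
--     'discover.com',
--     'paytm.com',
--     'phonepe.com',
--     'googlepay.com',
-- }
--
-- GOVERNMENT_DOMAINS = {
--     'gov.in',
--     'gov.uk',
--     'gov.au',
--     'gov.ca',
--     'usa.gov',
--     'nic.in',
-- }
--
-- EDUCATIONAL_DOMAINS = {
--     'aktu.ac.in',
--     'iit.ac.in',
--     'mit.edu',
--     'stanford.edu',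
--     'harvard.edu',
--     'ox.ac.uk',
--     'cam.ac.uk',
-- }
--
-- def get_domain_category(domain: str) -> str:
--     """Get category of whitelisted domain"""
--     domain = domain.lower().strip()
--
--     if domain.startswith('www.'):
--         domain = domain[4:]
--
--     if domain in GOVERNMENT_DOMAINS or any(domain.endswith('.' + d) for d in GOVERNMENT_DOMAINS):
--         return 'government'
--     elif domain in EDUCATIONAL_DOMAINS or any(domain.endswith('.' + d) for d in EDUCATIONAL_DOMAINS):
--         return 'educational'
--     elif domain in FINANCIAL_DOMAINS or any(domain.endswith('.' + d) for d in FINANCIAL_DOMAINS):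
--         return 'financial'
--     elif domain in LEGITIMATE_DOMAINS:
--         return 'trusted'
--     else:
--         return 'unknown'
-- ===== SOURCE B (Python) =====
-- LEGITIMATE_DOMAINS = {
--     'google.com', 'gmail.com', 'youtube.com',
--     'facebook.com', 'fb.com', 'instagram.com', 'whatsapp.com',
--     'microsoft.com', 'outlook.com', 'office.com', 'live.com',
--     'apple.com', 'icloud.com',
--     'amazon.com', 'aws.amazon.com',
--     'twitter.com', 'x.com',
--     'linkedin.com',
--     'netflix.com',
--     'zoom.us',
--     'dropbox.com',
--     'github.com',
--     'stackoverflow.com',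
--     'reddit.com',
--     'wikipedia.org',
--     'paypal.com',
--     'stripe.com',
--     'visa.com',
--     'mastercard.com',
--     'ebay.com',
--     'shopify.com',
--     'walmart.com',
--     'target.com',
--     'flipkart.com',
--     'paytm.com',
--     'phonepe.com',
--     'bharatpe.com',
--     'gov.in',
--     'nic.in',
--     'aktu.ac.in',
--     'adobe.com',
--     'salesforce.com',
--     'oracle.com',
--     'ibm.com',
--     'cisco.com',
-- }
--
-- FINANCIAL_DOMAINS = {
--     'paypal.com',
--     'stripe.com',
--     'square.com',
--     'bankofamerica.com',
--     'chase.com',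
--     'wellsfargo.com',
--     'citibank.com',
--     'americanexpress.com',
--     'discover.com',
--     'paytm.com',
--     'phonepe.com',
--     'googlepay.com',
-- }
--
-- GOVERNMENT_DOMAINS = {
--     'gov.in',
--     'gov.uk',
--     'gov.au',
--     'gov.ca',
--     'usa.gov',
--     'nic.in',
-- }
--
-- EDUCATIONAL_DOMAINS = {
--     'aktu.ac.in',
--     'iit.ac.in',
--     'mit.edu',
--     'stanford.edu',
--     'harvard.edu',
--     'ox.ac.uk',
--     'cam.ac.uk',
-- }
--
--
-- def get_domain_category(domain: str) -> str:
--     """Get category of whitelisted domain"""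
--     domain = domain.lower().strip()
--     if domain.startswith('www.'):
--         domain = domain[4:]
--     # the domain itself plus every dot-boundary suffix: one lookup per suffix
--     # replaces the per-set endswith scans of the original
--     candidates = [domain] + [domain[i + 1:] for i in range(len(domain)) if domain[i] == '.']
--     for category, table in (('government', GOVERNMENT_DOMAINS),
--                             ('educational', EDUCATIONAL_DOMAINS),
--                             ('financial', FINANCIAL_DOMAINS)):
--         if any(c in table for c in candidates):
--             return category
--     return 'trusted' if domain in LEGITIMATE_DOMAINS else 'unknown'
-- ===== Notes on version B (the rewrite author's own statement) =====
-- stated objective: alternative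
-- what changed: Instead of scanning each whitelist with an endswith test per entry, B builds the list of dot-boundary suffixes of the normalized domain once and does one membership lookup per suffix in each set (trusted stays exact-match only).
import Mathlib
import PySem

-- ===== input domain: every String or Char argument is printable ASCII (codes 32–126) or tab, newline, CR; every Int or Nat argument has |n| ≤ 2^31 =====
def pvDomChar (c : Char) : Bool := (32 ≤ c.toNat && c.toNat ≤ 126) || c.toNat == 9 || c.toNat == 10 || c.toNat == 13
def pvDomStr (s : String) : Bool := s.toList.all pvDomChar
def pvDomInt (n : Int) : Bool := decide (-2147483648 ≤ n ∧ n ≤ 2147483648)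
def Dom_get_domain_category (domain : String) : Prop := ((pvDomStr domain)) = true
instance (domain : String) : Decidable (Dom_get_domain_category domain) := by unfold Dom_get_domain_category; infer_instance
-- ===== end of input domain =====

-- B replaces the per-set endswith scans by one list of dot-boundary suffixes looked up in each set (alternative decomposition).

-- module constants (shared data of both ports)
def LEGITIMATE_DOMAINS : PySem.Set String := PySem.Set.ofList
  ["google.com", "gmail.com", "youtube.com",
   "facebook.com", "fb.com", "instagram.com", "whatsapp.com",
   "microsoft.com", "outlook.com", "office.com", "live.com",
   "apple.com", "icloud.com",
   "amazon.com", "aws.amazon.com",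
   "twitter.com", "x.com",
   "linkedin.com",
   "netflix.com",
   "zoom.us",
   "dropbox.com",
   "github.com",
   "stackoverflow.com",
   "reddit.com",
   "wikipedia.org",
   "paypal.com",
   "stripe.com",
   "visa.com",
   "mastercard.com",
   "ebay.com",
   "shopify.com",
   "walmart.com",
   "target.com",
   "flipkart.com",
   "paytm.com",
   "phonepe.com",
   "bharatpe.com",
   "gov.in",
   "nic.in",
   "aktu.ac.in",
   "adobe.com",
   "salesforce.com",
   "oracle.com",
   "ibm.com",
   "cisco.com"]

def FINANCIAL_DOMAINS : PySem.Set String := PySem.Set.ofList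
  ["paypal.com", "stripe.com", "square.com", "bankofamerica.com", "chase.com",
   "wellsfargo.com", "citibank.com", "americanexpress.com", "discover.com",
   "paytm.com", "phonepe.com", "googlepay.com"]

def GOVERNMENT_DOMAINS : PySem.Set String := PySem.Set.ofList
  ["gov.in", "gov.uk", "gov.au", "gov.ca", "usa.gov", "nic.in"]

def EDUCATIONAL_DOMAINS : PySem.Set String := PySem.Set.ofList
  ["aktu.ac.in", "iit.ac.in", "mit.edu", "stanford.edu", "harvard.edu",
   "ox.ac.uk", "cam.ac.uk"]

-- ===== PORT A =====
def get_domain_category (domain : String) : String :=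
  let d0 := PySem.Str.strip (PySem.Str.lower domain)
  let d := if PySem.Str.startswith d0 "www." then PySem.Str.slice d0 (some 4) none else d0
  if PySem.Set.contains GOVERNMENT_DOMAINS d
      || GOVERNMENT_DOMAINS.any (fun g => PySem.Str.endswith d ("." ++ g)) then "government"
  else if PySem.Set.contains EDUCATIONAL_DOMAINS d
      || EDUCATIONAL_DOMAINS.any (fun g => PySem.Str.endswith d ("." ++ g)) then "educational"
  else if PySem.Set.contains FINANCIAL_DOMAINS d
      || FINANCIAL_DOMAINS.any (fun g => PySem.Str.endswith d ("." ++ g)) then "financial"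
  else if PySem.Set.contains LEGITIMATE_DOMAINS d then "trusted"
  else "unknown"

-- ===== PORT B =====
-- Source B's comprehension [domain[i+1:] for i in range(len(domain)) if domain[i] == '.']:
-- one left-to-right scan over the characters, collecting the tail after each '.'
def pvDotSuffixes : List Char → List String
  | [] => []
  | c :: t => (if c = '.' then [String.ofList t] else []) ++ pvDotSuffixes t

def get_domain_category_alt (domain : String) : String :=
  let d0 := PySem.Str.strip (PySem.Str.lower domain)
  let d := if PySem.Str.startswith d0 "www." then PySem.Str.slice d0 (some 4) none else d0
  let candidates := d :: pvDotSuffixes d.toList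
  if candidates.any (fun c => PySem.Set.contains GOVERNMENT_DOMAINS c) then "government"
  else if candidates.any (fun c => PySem.Set.contains EDUCATIONAL_DOMAINS c) then "educational"
  else if candidates.any (fun c => PySem.Set.contains FINANCIAL_DOMAINS c) then "financial"
  else if PySem.Set.contains LEGITIMATE_DOMAINS d then "trusted"
  else "unknown"

-- ===== PRECONDITION & SPEC =====
def Spec_get_domain_category (domain : String) (out : String) : Prop := out = get_domain_category_alt domain
instance (domain : String) (out : String) : Decidable (Spec_get_domain_category domain out) := by unfold Spec_get_domain_category; infer_instance

-- ===== CLAIM (what is proved, stated in full; the proofs are below) =====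
def Claim_equal_get_domain_category : Prop := ∀ (domain : String), Dom_get_domain_category domain → Spec_get_domain_category domain (get_domain_category domain)

-- ===== LEMMAS AND PROOFS =====

theorem mem_pvDotSuffixes (l : List Char) (s : String) :
    s ∈ pvDotSuffixes l ↔ ('.' :: s.toList) <:+ l := by
  induction l with
  | nil => simp [pvDotSuffixes]
  | cons c t ih =>
    simp only [pvDotSuffixes, List.mem_append, ih, List.suffix_cons_iff]
    constructor
    · rintro (h | h)
      · split_ifs at h with hc
        · simp at h; subst h hc; left; simp [String.toList_ofList]
        · simp at h
      · right; exact h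
    · rintro (h | h)
      · left
        rw [List.cons_eq_cons] at h
        obtain ⟨hc, ht⟩ := h
        subst hc
        simp [← ht, String.ofList_toList]
      · right; exact h

theorem branch_eq (S : PySem.Set String) (d : String) :
    (PySem.Set.contains S d
      || S.any (fun g => PySem.Str.endswith d ("." ++ g)))
    = (d :: pvDotSuffixes d.toList).any (fun c => PySem.Set.contains S c) := by
  simp only [List.any_cons]
  congr 1
  rw [Bool.eq_iff_iff]
  simp only [List.any_eq_true, PySem.Str.endswith_eq, PySem.Chars.endswith_iff,
    mem_pvDotSuffixes, PySem.Set.contains, List.contains_iff_mem]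
  constructor
  · rintro ⟨g, hg, hsuf⟩
    refine ⟨g, ?_, hg⟩
    simpa using hsuf
  · rintro ⟨c, hc, hmem⟩
    exact ⟨c, hmem, by simpa using hc⟩

-- ===== VERDICT (by name: the statement is the Claim_ definition above) =====
theorem get_domain_category_spec : Claim_equal_get_domain_category := by
  intro domain _
  unfold Spec_get_domain_category get_domain_category get_domain_category_alt
  simp only [← branch_eq]
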